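-- pv_equiv track=rewrite | github.com/HampusAndersson01/Hass-Config | nodalink-core/api/scenario_utils.py | generate_time_buckets
-- ===== SOURCE A (Python) =====
-- from typing import List, Dict, Any, Optional, Union
--
-- def generate_time_buckets(bucket_minutes: int = 60) -> List[str]:
--     """
--     Generate all possible time buckets for a given bucket size.
--
--     Args:
--         bucket_minutes: Minutes per bucket
--
--     Returns:
--         List of time bucket strings
--     """
--     buckets = []
--
--     if bucket_minutes == 60:
--         # Hour-based buckets
--         for hour in range(24):
--             next_hour = (hour + 1) % 24
--             buckets.append(f"{hour:02d}-{next_hour:02d}")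
--
--     elif bucket_minutes == 30:
--         # 30-minute buckets
--         for hour in range(24):
--             buckets.append(f"{hour:02d}:00-{hour:02d}:30")
--             next_hour = (hour + 1) % 24
--             buckets.append(f"{hour:02d}:30-{next_hour:02d}:00")
--
--     elif bucket_minutes == 15:
--         # 15-minute buckets
--         for hour in range(24):
--             for quarter in range(4):
--                 start_min = quarter * 15
--                 end_min = start_min + 15
--                 end_hour = hour
--
--                 if end_min == 60:
--                     end_min = 0
--                     end_hour = (hour + 1) % 24
--
--                 buckets.append(
--                     f"{hour:02d}:{start_min:02d}-{end_hour:02d}:{end_min:02d}")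
--
--     return buckets
-- ===== SOURCE B (Python) =====
-- def generate_time_buckets(bucket_minutes: int = 60):
--     if bucket_minutes not in (60, 30, 15):
--         return []
--     out = []
--     for t in range(0, 1440, bucket_minutes):
--         sh, sm = divmod(t, 60)
--         e = t + bucket_minutes
--         eh = (e // 60) % 24
--         em = e % 60
--         if bucket_minutes == 60:
--             out.append(f"{sh:02d}-{eh:02d}")
--         else:
--             out.append(f"{sh:02d}:{sm:02d}-{eh:02d}:{em:02d}")
--     return out
-- ===== Notes on version B (the rewrite author's own statement) =====
-- stated objective: simpler
-- what changed: Replaced the three separate hour-indexed branch loops (with a nested quarter loop for 15) by one guard plus a single traversal of the whole day in steps of bucket_minutes, deriving each label from the minute offset by divmod.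
import Mathlib
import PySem

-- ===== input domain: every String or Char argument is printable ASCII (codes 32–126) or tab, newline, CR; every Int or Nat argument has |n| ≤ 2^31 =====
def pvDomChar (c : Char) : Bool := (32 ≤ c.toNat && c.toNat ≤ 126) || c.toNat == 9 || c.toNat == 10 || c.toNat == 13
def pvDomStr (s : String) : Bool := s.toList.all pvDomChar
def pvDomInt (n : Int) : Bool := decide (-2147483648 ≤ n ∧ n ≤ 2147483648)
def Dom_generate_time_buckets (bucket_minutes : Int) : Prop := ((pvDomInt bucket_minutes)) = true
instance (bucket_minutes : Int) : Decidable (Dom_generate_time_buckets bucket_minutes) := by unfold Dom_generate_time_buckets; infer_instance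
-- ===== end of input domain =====

-- ===== PORT A =====
-- B: one loop over the day in minutes instead of three hour-indexed branch loops; return value only, no side effects
def pad2 (n : Int) : String :=  -- f"{n:02d}" for 0 <= n < 100
  if n < 10 then "0" ++ PySem.Int.toStr n else PySem.Int.toStr n

def generate_time_buckets (bucket_minutes : Int) : List String :=
  if bucket_minutes = 60 then
    (PySem.List.pyRange 0 24 1).foldl (fun buckets hour =>
      let next_hour := PySem.Int.mod (hour + 1) 24
      buckets ++ [pad2 hour ++ "-" ++ pad2 next_hour]) []
  else if bucket_minutes = 30 then
    (PySem.List.pyRange 0 24 1).foldl (fun buckets hour =>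
      let b1 := buckets ++ [pad2 hour ++ ":00-" ++ pad2 hour ++ ":30"]
      let next_hour := PySem.Int.mod (hour + 1) 24
      b1 ++ [pad2 hour ++ ":30-" ++ pad2 next_hour ++ ":00"]) []
  else if bucket_minutes = 15 then
    (PySem.List.pyRange 0 24 1).foldl (fun buckets hour =>
      (PySem.List.pyRange 0 4 1).foldl (fun bs quarter =>
        let start_min := quarter * 15
        let end_min := start_min + 15
        let end_hour := hour
        let p := if end_min = 60 then ((0 : Int), PySem.Int.mod (hour + 1) 24)
                 else (end_min, end_hour)
        bs ++ [pad2 hour ++ ":" ++ pad2 start_min ++ "-" ++ pad2 p.2 ++ ":" ++ pad2 p.1]) buckets) []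
  else []

-- ===== PORT B =====
def generate_time_buckets_alt (bucket_minutes : Int) : List String :=
  if bucket_minutes = 60 ∨ bucket_minutes = 30 ∨ bucket_minutes = 15 then
    (PySem.List.pyRange 0 1440 bucket_minutes).foldl (fun out t =>
      let sh := PySem.Int.floordiv t 60
      let sm := PySem.Int.mod t 60
      let e := t + bucket_minutes
      let eh := PySem.Int.mod (PySem.Int.floordiv e 60) 24
      let em := PySem.Int.mod e 60
      out ++ [if bucket_minutes = 60 then pad2 sh ++ "-" ++ pad2 eh
              else pad2 sh ++ ":" ++ pad2 sm ++ "-" ++ pad2 eh ++ ":" ++ pad2 em]) []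
  else []

-- ===== PRECONDITION & SPEC =====
def Spec_generate_time_buckets (bucket_minutes : Int) (out : List String) : Prop := out = generate_time_buckets_alt bucket_minutes
instance (bucket_minutes : Int) (out : List String) : Decidable (Spec_generate_time_buckets bucket_minutes out) := by unfold Spec_generate_time_buckets; infer_instance

-- ===== CLAIM (what is proved, stated in full; the proofs are below) =====
def Claim_equal_generate_time_buckets : Prop := ∀ (bucket_minutes : Int), Dom_generate_time_buckets bucket_minutes → Spec_generate_time_buckets bucket_minutes (generate_time_buckets bucket_minutes)

-- ===== LEMMAS AND PROOFS =====

-- ===== VERDICT (by name: the statement is the Claim_ definition above) =====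
set_option maxRecDepth 4096 in
theorem generate_time_buckets_spec : Claim_equal_generate_time_buckets := by
  intro b _
  unfold Spec_generate_time_buckets
  by_cases h60 : b = 60
  · subst h60; decide
  by_cases h30 : b = 30
  · subst h30; decide
  by_cases h15 : b = 15
  · subst h15; decide
  simp [generate_time_buckets, generate_time_buckets_alt, h60, h30, h15]
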